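-- pv_equiv track=rewrite | github.com/dennissmith0/Prime_Playground | Primes/gen_block_rhs.py | generate_blocking_positions
-- ===== SOURCE A (Python) =====
-- def position_to_integer(sequence, index):
--     if index == 5:
--         return (sequence + 1) * 6 + 1
--     elif index == 3:
--         return (sequence + 1) * 6 - 1
--
-- def generate_blocking_positions(n, primes):
--     blocking_positions_dict = {}
--
--     # Calculate the number of sequences
--     num_sequences = n // 6 + 1
--     row = 0
--
--     for i, p in enumerate(primes):
--         blocking_positions = []
--         row += 1
--         # Generate blocking positions for multiples of `p` on RHS
--         # Start from sequence `p` - 2 and increment by `p` each time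
--         for sequence in range((7 * row) - p, num_sequences, p):
--             if position_to_integer(sequence, 5) >= p**2:
--                 blocking_positions.append((sequence, 5))
--
--         # Generate blocking positions for multiples of `p` on LHS
--         # Start from sequence `p` + 5 and increment by `p` each time
--         for sequence in range(p - (row + 1), num_sequences, p):
--             if position_to_integer(sequence, 3) >= p**2:
--                 blocking_positions.append((sequence, 3))
--
--         blocking_positions_dict[p] = blocking_positions
--
--     return blocking_positions_dict
-- ===== SOURCE B (Python) =====
-- def _ge_tail(a, b, p, T):
--     # [s for s in range(a, b, p) if s >= T], the first qualifying element computed arithmetically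
--     if p > 0:
--         if T > a:
--             a += p * ((T - a + p - 1) // p)
--         return range(a, b, p)
--     return range(a, max(b, T - 1), p)
--
-- def generate_blocking_positions(n, primes):
--     stop = n // 6 + 1
--     out = {}
--     for row, p in enumerate(primes, 1):
--         # (s+1)*6+1 >= p*p  <=>  s >= (p*p-2)//6 ;  (s+1)*6-1 >= p*p  <=>  s >= p*p//6
--         out[p] = [(s, 5) for s in _ge_tail(7 * row - p, stop, p, (p * p - 2) // 6)] \
--                + [(s, 3) for s in _ge_tail(p - row - 1, stop, p, p * p // 6)]
--     return out
-- ===== Notes on version B (the rewrite author's own statement) =====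
-- stated objective: alternative
-- what changed: Instead of scanning each range from its start and testing (sequence+1)*6+/-1 >= p**2 on every element, B computes the first sequence meeting the p**2 threshold arithmetically (ceiling division) and builds only the qualifying tail of each range.
import Mathlib
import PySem

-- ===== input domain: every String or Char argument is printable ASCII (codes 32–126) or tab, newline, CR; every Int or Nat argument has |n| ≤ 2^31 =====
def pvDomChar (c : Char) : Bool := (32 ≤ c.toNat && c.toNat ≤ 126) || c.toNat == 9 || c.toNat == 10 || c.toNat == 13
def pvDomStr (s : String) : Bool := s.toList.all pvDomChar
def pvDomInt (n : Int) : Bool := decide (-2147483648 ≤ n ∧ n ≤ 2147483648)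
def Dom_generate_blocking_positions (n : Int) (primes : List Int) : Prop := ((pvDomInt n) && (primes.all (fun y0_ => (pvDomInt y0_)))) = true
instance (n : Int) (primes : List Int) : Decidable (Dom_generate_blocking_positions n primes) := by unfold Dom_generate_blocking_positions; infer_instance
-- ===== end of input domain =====

-- B replaces A's per-prime scan of each whole range (testing the p² threshold on every element)
-- by an arithmetic computation (ceiling division) of where the threshold is first met.


-- ===== PORT A =====
-- the 'else 0' branch is unreachable here: A only calls this with index 5 or 3
-- (for other indices Python returns None and A's comparison would raise).
def position_to_integer (sequence : Int) (index : Int) : Int :=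
  if index = 5 then (sequence + 1) * 6 + 1
  else if index = 3 then (sequence + 1) * 6 - 1
  else 0

def generate_blocking_positions (n : Int) (primes : List Int) : List (Int × List (Int × Int)) :=
  let num_sequences : Int := PySem.Int.floordiv n 6 + 1
  let st :=
    (PySem.List.enumerate primes).foldl
      (fun (st : PySem.Dict Int (List (Int × Int)) × Int) ip =>
        let p := ip.2
        let row := st.2 + 1
        let blocking_positions : List (Int × Int) :=
          (PySem.List.pyRange (7 * row - p) num_sequences p).foldl
            (fun acc sequence =>
              if position_to_integer sequence 5 ≥ p ^ 2 then acc ++ [(sequence, 5)] else acc) []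
        let blocking_positions :=
          (PySem.List.pyRange (p - (row + 1)) num_sequences p).foldl
            (fun acc sequence =>
              if position_to_integer sequence 3 ≥ p ^ 2 then acc ++ [(sequence, 3)] else acc)
            blocking_positions
        (st.1.insert p blocking_positions, row))
      (PySem.Dict.empty, 0)
  st.1.items

-- ===== PORT B =====
-- [s for s in range(a, b, p) if s >= T] without scanning the part of the range below T
def geTail (a b p T : Int) : List Int :=
  if 0 < p then
    let a' := if T > a then a + p * PySem.Int.floordiv (T - a + p - 1) p else a
    PySem.List.pyRange a' b p
  else
    PySem.List.pyRange a (max b (T - 1)) p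

def generate_blocking_positions_alt (n : Int) (primes : List Int) : List (Int × List (Int × Int)) :=
  let stop : Int := PySem.Int.floordiv n 6 + 1
  let out :=
    (PySem.List.enumerate primes 1).foldl
      (fun (out : PySem.Dict Int (List (Int × Int))) rp =>
        let row := rp.1
        let p := rp.2
        out.insert p
          ((geTail (7 * row - p) stop p (PySem.Int.floordiv (p * p - 2) 6)).map (fun s => (s, 5)) ++
           (geTail (p - row - 1) stop p (PySem.Int.floordiv (p * p) 6)).map (fun s => (s, 3))))
      PySem.Dict.empty
  out.items

-- ===== PRECONDITION & SPEC =====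
-- Pre_ excludes primes containing 0: there Python's range(a, b, 0) raises ValueError in A (and in B).
def Pre_generate_blocking_positions (n : Int) (primes : List Int) : Prop := (0 : Int) ∉ primes
instance (n : Int) (primes : List Int) : Decidable (Pre_generate_blocking_positions n primes) := by unfold Pre_generate_blocking_positions; infer_instance
def pvWitness_generate_blocking_positions : Int × List Int := (100, [5, 7, 11])

def Spec_generate_blocking_positions (n : Int) (primes : List Int) (out : List (Int × List (Int × Int))) : Prop := out = generate_blocking_positions_alt n primes
instance (n : Int) (primes : List Int) (out : List (Int × List (Int × Int))) : Decidable (Spec_generate_blocking_positions n primes out) := by unfold Spec_generate_blocking_positions; infer_instance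

-- ===== CLAIM (what is proved, stated in full; the proofs are below) =====
def Claim_equal_generate_blocking_positions : Prop := ∀ (n : Int) (primes : List Int), Dom_generate_blocking_positions n primes → Pre_generate_blocking_positions n primes → Spec_generate_blocking_positions n primes (generate_blocking_positions n primes)

-- ===== LEMMAS AND PROOFS =====

-- membership in a general-step pyRange with NEGATIVE step (the positive case is PySem.List.mem_pyRange_iff_of_pos)
theorem mem_pyRange_iff_of_neg {a b p : Int} (hp : p < 0) (x : Int) :
    x ∈ PySem.List.pyRange a b p ↔ x ≤ a ∧ b < x ∧ p ∣ x - a := by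
  have hp0 : p ≠ 0 := ne_of_lt hp
  have hm : 0 < -p := by omega
  unfold PySem.List.pyRange
  rw [if_neg hp0, if_neg (not_lt.2 hp.le)]
  by_cases hba : b < a
  · rw [if_pos hba]
    set q : Int := (a - b + -p - 1) / -p with hq
    have hq1 : q * (-p) ≤ a - b + -p - 1 := Int.ediv_mul_le _ (by omega)
    have hq2 : a - b + -p - 1 < (q + 1) * (-p) := Int.lt_ediv_add_one_mul_self _ hm
    simp only [List.mem_map, List.mem_range]
    constructor
    · rintro ⟨k, hk, rfl⟩
      have hk' : (k : Int) ≤ q - 1 := by omega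
      have h1 : (-p) * (k : Int) ≤ (-p) * (q - 1) := mul_le_mul_of_nonneg_left hk' (by omega)
      have h2 : 0 ≤ (-p) * (k : Int) := mul_nonneg (by omega) (by positivity)
      refine ⟨by nlinarith, by nlinarith, ⟨(k : Int), by ring⟩⟩
    · rintro ⟨hxa, hbx, t, ht⟩
      have ht0 : 0 ≤ t := by nlinarith
      have h1 : t * (-p) ≤ a - b - 1 := by nlinarith
      have h2 : t + 1 ≤ q := by
        rw [hq]
        exact (Int.le_ediv_iff_mul_le hm).2 (by nlinarith)
      refine ⟨t.toNat, by omega, ?_⟩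
      rw [Int.toNat_of_nonneg ht0]; omega
  · rw [if_neg hba]
    simp only [List.range_zero, List.map_nil, List.not_mem_nil, false_iff]
    rintro ⟨hxa, hbx, -⟩
    omega

theorem pairwise_pyRange_pos {a b p : Int} (hp : 0 < p) :
    (PySem.List.pyRange a b p).Pairwise (· < ·) := by
  unfold PySem.List.pyRange
  rw [if_neg (ne_of_gt hp)]
  refine List.Pairwise.map _ ?_ List.pairwise_lt_range
  intro k l hkl
  have : (k : Int) < l := by exact_mod_cast hkl
  nlinarith

theorem pairwise_pyRange_neg {a b p : Int} (hp : p < 0) :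
    (PySem.List.pyRange a b p).Pairwise (· > ·) := by
  unfold PySem.List.pyRange
  rw [if_neg (ne_of_lt hp)]
  refine List.Pairwise.map _ ?_ List.pairwise_lt_range
  intro k l hkl
  have : (k : Int) < l := by exact_mod_cast hkl
  nlinarith

theorem eq_of_mem_pairwise_lt {l₁ l₂ : List Int} (h1 : l₁.Pairwise (· < ·))
    (h2 : l₂.Pairwise (· < ·)) (hm : ∀ x, x ∈ l₁ ↔ x ∈ l₂) : l₁ = l₂ :=
  List.eq_of_perm_of_sorted (fun _ _ _ _ hxy hyx => absurd (lt_trans hxy hyx) (lt_irrefl _))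
    h1 h2 ((List.perm_ext_iff_of_nodup (h1.imp ne_of_lt) (h2.imp ne_of_lt)).2 hm)

theorem eq_of_mem_pairwise_gt {l₁ l₂ : List Int} (h1 : l₁.Pairwise (· > ·))
    (h2 : l₂.Pairwise (· > ·)) (hm : ∀ x, x ∈ l₁ ↔ x ∈ l₂) : l₁ = l₂ :=
  List.eq_of_perm_of_sorted (fun _ _ _ _ hxy hyx => absurd (lt_trans hyx hxy) (lt_irrefl _))
    h1 h2 ((List.perm_ext_iff_of_nodup (h1.imp ne_of_gt) (h2.imp ne_of_gt)).2 hm)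

-- the closed-form tail equals the threshold-filtered range
theorem geTail_eq_filter (a b p T : Int) (hp : p ≠ 0) :
    geTail a b p T = (PySem.List.pyRange a b p).filter (fun s => decide (T ≤ s)) := by
  unfold geTail
  rcases lt_or_gt_of_ne hp with hneg | hpos
  · rw [if_neg (by omega)]
    refine eq_of_mem_pairwise_gt (pairwise_pyRange_neg hneg)
      ((pairwise_pyRange_neg hneg).filter _) (fun x => ?_)
    rw [mem_pyRange_iff_of_neg hneg, List.mem_filter, mem_pyRange_iff_of_neg hneg]
    simp only [decide_eq_true_eq]
    omega
  · rw [if_pos hpos]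
    refine eq_of_mem_pairwise_lt (pairwise_pyRange_pos hpos)
      ((pairwise_pyRange_pos hpos).filter _) (fun x => ?_)
    rw [PySem.List.mem_pyRange_iff_of_pos hpos, List.mem_filter,
      PySem.List.mem_pyRange_iff_of_pos hpos]
    simp only [decide_eq_true_eq]
    by_cases hTa : T > a
    · rw [if_pos hTa]
      set q : Int := PySem.Int.floordiv (T - a + p - 1) p with hq
      have hq1 : T - a ≤ q * p := by
        have := (PySem.Int.floordiv_lt_iff_lt_mul (a := T - a + p - 1) (q := q + 1) hpos).1 (by omega)
        nlinarith
      have hq2 : (q - 1) * p < T - a := by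
        have := (PySem.Int.le_floordiv_iff_mul_le (a := T - a + p - 1) (q := q) hpos).1 (le_refl q)
        nlinarith
      have hq0 : 1 ≤ q := by nlinarith
      constructor
      · rintro ⟨hax, hxb, t, ht⟩
        have : 0 ≤ q * p := by nlinarith
        refine ⟨⟨by nlinarith, hxb, ⟨t + q, by linarith [ht]⟩⟩, by nlinarith⟩
      · rintro ⟨⟨hax, hxb, t, ht⟩, hTx⟩
        have hqt : q ≤ t := by nlinarith
        refine ⟨by nlinarith, hxb, ⟨t - q, by ring_nf; ring_nf at ht; omega⟩⟩
    · rw [if_neg hTa]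
      constructor
      · rintro ⟨hax, hxb, hd⟩; exact ⟨⟨hax, hxb, hd⟩, by omega⟩
      · rintro ⟨⟨hax, hxb, hd⟩, -⟩; exact ⟨hax, hxb, hd⟩

-- A's position tests are exactly B's arithmetic thresholds
theorem cond5_iff (p s : Int) :
    (position_to_integer s 5 ≥ p ^ 2) ↔ (PySem.Int.floordiv (p * p - 2) 6 ≤ s) := by
  rw [PySem.Int.floordiv_eq_ediv_of_pos (by norm_num)]
  have h : position_to_integer s 5 = (s + 1) * 6 + 1 := rfl
  rw [h, pow_two]
  omega

theorem cond3_iff (p s : Int) :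
    (position_to_integer s 3 ≥ p ^ 2) ↔ (PySem.Int.floordiv (p * p) 6 ≤ s) := by
  rw [PySem.Int.floordiv_eq_ediv_of_pos (by norm_num)]
  have h : position_to_integer s 3 = (s + 1) * 6 - 1 := rfl
  rw [h, pow_two]
  omega

-- one prime's list the two ways
theorem bp_eq (ns p row : Int) (hp : p ≠ 0) :
    ((PySem.List.pyRange (p - (row + 1)) ns p).foldl
        (fun acc s => if position_to_integer s 3 ≥ p ^ 2 then acc ++ [(s, (3:Int))] else acc)
        ((PySem.List.pyRange (7 * row - p) ns p).foldl
          (fun acc s => if position_to_integer s 5 ≥ p ^ 2 then acc ++ [(s, (5:Int))] else acc) []))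
    = (geTail (7 * row - p) ns p (PySem.Int.floordiv (p * p - 2) 6)).map (fun s => (s, (5:Int))) ++
      (geTail (p - row - 1) ns p (PySem.Int.floordiv (p * p) 6)).map (fun s => (s, (3:Int))) := by
  have e5 : (fun (acc : List (Int × Int)) s =>
      if position_to_integer s 5 ≥ p ^ 2 then acc ++ [(s, (5:Int))] else acc)
      = (fun acc s => if (fun s => decide (position_to_integer s 5 ≥ p ^ 2)) s = true
          then acc ++ [(fun s => (s, (5:Int))) s] else acc) := by
    funext acc s; simp
  have e3 : (fun (acc : List (Int × Int)) s =>
      if position_to_integer s 3 ≥ p ^ 2 then acc ++ [(s, (3:Int))] else acc)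
      = (fun acc s => if (fun s => decide (position_to_integer s 3 ≥ p ^ 2)) s = true
          then acc ++ [(fun s => (s, (3:Int))) s] else acc) := by
    funext acc s; simp
  rw [e5, e3, PySem.List.foldl_append_if, PySem.List.foldl_append_if, List.nil_append]
  rw [geTail_eq_filter _ _ _ _ hp, geTail_eq_filter _ _ _ _ hp]
  have : p - (row + 1) = p - row - 1 := by ring
  rw [this]
  congr 1
  · congr 1
    exact List.filter_congr (fun x _ => by simp [cond5_iff])
  · congr 1
    exact List.filter_congr (fun x _ => by simp [cond3_iff])

-- the whole dict-building loops agree (A's row counter r matches B's enumerate start r+1)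
theorem fold_eq (ns : Int) (l : List Int) (s r : Int) (d : PySem.Dict Int (List (Int × Int)))
    (hl : (0 : Int) ∉ l) :
    ((PySem.List.enumerate l s).foldl
      (fun (st : PySem.Dict Int (List (Int × Int)) × Int) ip =>
        (st.1.insert ip.2
          ((PySem.List.pyRange (ip.2 - ((st.2 + 1) + 1)) ns ip.2).foldl
            (fun acc sequence =>
              if position_to_integer sequence 3 ≥ ip.2 ^ 2 then acc ++ [(sequence, (3:Int))] else acc)
            ((PySem.List.pyRange (7 * (st.2 + 1) - ip.2) ns ip.2).foldl
              (fun acc sequence =>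
                if position_to_integer sequence 5 ≥ ip.2 ^ 2 then acc ++ [(sequence, (5:Int))] else acc)
              [])), st.2 + 1)) (d, r)).1
    = (PySem.List.enumerate l (r + 1)).foldl
        (fun out rp => out.insert rp.2
          ((geTail (7 * rp.1 - rp.2) ns rp.2 (PySem.Int.floordiv (rp.2 * rp.2 - 2) 6)).map
              (fun s => (s, (5:Int))) ++
           (geTail (rp.2 - rp.1 - 1) ns rp.2 (PySem.Int.floordiv (rp.2 * rp.2) 6)).map
              (fun s => (s, (3:Int))))) d := by
  induction l generalizing s r d with
  | nil => simp [PySem.List.enumerate_nil]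
  | cons x xs ih =>
    rw [PySem.List.enumerate_cons, PySem.List.enumerate_cons, List.foldl_cons, List.foldl_cons]
    have hx : x ≠ 0 := fun h => hl (h ▸ List.mem_cons_self ..)
    rw [bp_eq ns x (r + 1) hx]
    exact ih (s + 1) (r + 1) _ (fun h => hl (List.mem_cons_of_mem _ h))

-- ===== VERDICT (by name: the statement is the Claim_ definition above) =====
theorem generate_blocking_positions_spec : Claim_equal_generate_blocking_positions := by
  intro n primes _ hpre
  unfold Spec_generate_blocking_positions
  unfold generate_blocking_positions generate_blocking_positions_alt
  simp only []
  rw [fold_eq (PySem.Int.floordiv n 6 + 1) primes 0 0 PySem.Dict.empty hpre]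
  norm_num
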